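-- pv_equiv track=rewrite | github.com/stevenjoezhang/po2lmo.py | po2lmo.py | extract_string
-- ===== SOURCE A (Python) =====
-- from typing import List, Tuple, Optional
--
-- def extract_string(line: str) -> Optional[str]:
--     """
--     Extract quoted string from a PO file line
--     Handles escape sequences properly
--     """
--     # Find the first quote
--     quote_start = line.find('"')
--     if quote_start == -1:
--         return None
--
--     result = []
--     i = quote_start + 1
--     escape = False
--
--     while i < len(line):
--         char = line[i]
--
--         if escape:
--             if char in ['"', "\\"]:
--                 result.append(char)
--             elif char == "n":
--                 result.append("\n")
--             elif char == "t":
--                 result.append("\t")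
--             elif char == "r":
--                 result.append("\r")
--             else:
--                 result.append(char)
--             escape = False
--         else:
--             if char == "\\":
--                 escape = True
--             elif char == '"':
--                 break
--             else:
--                 result.append(char)
--         i += 1
--
--     return "".join(result) if not escape else None
-- ===== SOURCE B (Python) =====
-- from typing import Optional
--
--
-- def _raw_span(s: str) -> Optional[str]:
--     """Raw content up to the first unescaped '"' (or all of s if there is
--     none); None if s ends in a pending (lone trailing) backslash."""
--     i = 0
--     n = len(s)
--     while i < n:
--         c = s[i]
--         if c == "\\":
--             if i + 1 == n:
--                 return None
--             i += 2
--         elif c == '"':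
--             return s[:i]
--         else:
--             i += 1
--     return s
--
--
-- _ESCAPES = {"n": "\n", "t": "\t", "r": "\r"}
--
--
-- def _decode(s: str) -> str:
--     """Replace each backslash-pair by its meaning (unknown escapes drop the
--     backslash and keep the character)."""
--     out = []
--     i = 0
--     while i < len(s):
--         c = s[i]
--         if c == "\\":
--             e = s[i + 1]
--             out.append(_ESCAPES.get(e, e))
--             i += 2
--         else:
--             out.append(c)
--             i += 1
--     return "".join(out)
--
--
-- def extract_string(line: str) -> Optional[str]:
--     quote_start = line.find('"')
--     if quote_start == -1:
--         return None
--     span = _raw_span(line[quote_start + 1:])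
--     if span is None:
--         return None
--     return _decode(span)
-- ===== Notes on version B (the rewrite author's own statement) =====
-- stated objective: alternative
-- what changed: Replaced A's single scan with a mutable escape-flag state machine by a two-pass design: first find the raw span up to the unescaped closing quote (consuming backslash pairs two at a time, None on a pending trailing backslash), then decode escapes via a table in a second pass.
import Mathlib
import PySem

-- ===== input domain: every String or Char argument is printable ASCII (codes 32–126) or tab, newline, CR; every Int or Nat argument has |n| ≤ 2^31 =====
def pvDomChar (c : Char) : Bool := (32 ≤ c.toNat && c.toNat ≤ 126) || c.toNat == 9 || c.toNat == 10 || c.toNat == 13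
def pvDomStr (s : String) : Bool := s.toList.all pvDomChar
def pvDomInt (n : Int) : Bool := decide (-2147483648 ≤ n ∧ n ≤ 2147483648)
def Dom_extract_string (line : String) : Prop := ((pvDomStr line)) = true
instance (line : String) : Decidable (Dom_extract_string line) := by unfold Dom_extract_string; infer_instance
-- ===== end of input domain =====

-- B replaces A's one-pass escape-flag state machine by two passes: find the raw
-- span up to the unescaped closing quote, then decode escapes (alternative, same cost).

-- ===== PORT A =====
-- A's while-loop over indices i = quote_start+1 .. len(line)-1 with state
-- (result, escape); ported as structural recursion over the remaining characters.
def pvALoop : List Char → List Char → Bool → (List Char × Bool)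
  | [], res, esc => (res, esc)
  | c :: rest, res, esc =>
    if esc then
      let res' :=
        if c = '"' ∨ c = '\\' then res ++ [c]
        else if c = 'n' then res ++ ['\n']
        else if c = 't' then res ++ ['\t']
        else if c = 'r' then res ++ ['\r']
        else res ++ [c]
      pvALoop rest res' false
    else
      if c = '\\' then pvALoop rest res true
      else if c = '"' then (res, esc)   -- break
      else pvALoop rest (res ++ [c]) esc

def extract_string (line : String) : Option String :=
  let quote_start := PySem.Str.find line "\""
  if quote_start = -1 then none
  else
    let p := pvALoop (line.toList.drop (quote_start.toNat + 1)) [] false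
    if p.2 then none else some (String.ofList p.1)

-- ===== PORT B =====
-- B's _raw_span: raw content before the first unescaped '"' (all of s if none);
-- none on a pending trailing backslash.  s[:i] prefix built on the way back.
def pvRawSpan : List Char → Option (List Char)
  | [] => some []
  | c :: rest =>
    if c = '\\' then
      match rest with
      | [] => none
      | d :: rest' => (pvRawSpan rest').map (fun t => c :: d :: t)
    else if c = '"' then some []
    else (pvRawSpan rest).map (fun t => c :: t)

-- B's _ESCAPES table lookup
def pvEsc (d : Char) : Char :=
  if d = 'n' then '\n' else if d = 't' then '\t' else if d = 'r' then '\r' else d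

-- B's _decode: consume backslash pairs two at a time
def pvDecode : List Char → List Char
  | [] => []
  | '\\' :: d :: rest => pvEsc d :: pvDecode rest
  | c :: rest => c :: pvDecode rest

def extract_string_alt (line : String) : Option String :=
  let quote_start := PySem.Str.find line "\""
  if quote_start = -1 then none
  else
    match pvRawSpan (PySem.List.slice line.toList (some (quote_start + 1)) none) with
    | none => none
    | some span => some (String.ofList (pvDecode span))

-- ===== PRECONDITION & SPEC =====
def Spec_extract_string (line : String) (out : Option String) : Prop := out = extract_string_alt line
instance (line : String) (out : Option String) : Decidable (Spec_extract_string line out) := by unfold Spec_extract_string; infer_instance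

-- ===== CLAIM (what is proved, stated in full; the proofs are below) =====
def Claim_equal_extract_string : Prop := ∀ (line : String), Dom_extract_string line → Spec_extract_string line (extract_string line)

-- ===== LEMMAS AND PROOFS =====

-- one-step equations for A's loop (the definitional unfolding, with the Bool literal reduced)
lemma pvALoop_nil (res : List Char) (esc : Bool) : pvALoop [] res esc = (res, esc) := rfl

lemma pvALoop_cons_false (c : Char) (rest res : List Char) :
    pvALoop (c :: rest) res false
      = if c = '\\' then pvALoop rest res true
        else if c = '"' then (res, false)
        else pvALoop rest (res ++ [c]) false := by
  simp only [pvALoop, Bool.false_eq_true, if_false]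

-- in escape state A appends exactly pvEsc c (both of A's catch-all branches) and clears the flag
lemma pvALoop_cons_true (c : Char) (rest res : List Char) :
    pvALoop (c :: rest) res true = pvALoop rest (res ++ [pvEsc c]) false := by
  simp only [pvALoop, pvEsc]
  by_cases h1 : c = '"' <;> by_cases h2 : c = '\\' <;>
    by_cases h3 : c = 'n' <;> by_cases h4 : c = 't' <;>
    by_cases h5 : c = 'r' <;> simp_all

lemma pvRawSpan_backslash (rest : List Char) :
    pvRawSpan ('\\' :: rest)
      = match rest with
        | [] => none
        | d :: rest' => (pvRawSpan rest').map (fun t => '\\' :: d :: t) := by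
  rw [pvRawSpan.eq_def]
  simp

lemma pvRawSpan_quote (rest : List Char) : pvRawSpan ('"' :: rest) = some [] := by
  rw [pvRawSpan.eq_def]
  simp

lemma pvRawSpan_other (c : Char) (rest : List Char) (hc : c ≠ '\\') (hq : c ≠ '"') :
    pvRawSpan (c :: rest) = (pvRawSpan rest).map (fun t => c :: t) := by
  rw [pvRawSpan.eq_def]
  simp [hc, hq]

lemma pvDecode_pair (d : Char) (rest : List Char) :
    pvDecode ('\\' :: d :: rest) = pvEsc d :: pvDecode rest := rfl

lemma pvDecode_other (c : Char) (rest : List Char) (hc : c ≠ '\\') :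
    pvDecode (c :: rest) = c :: pvDecode rest := by
  cases rest <;> (rw [pvDecode.eq_def]; simp [hc])

-- The heart: A's escape-flag scan equals B's span-then-decode composition.
lemma pvKey : ∀ (n : ℕ) (l res : List Char), l.length ≤ n →
    (if (pvALoop l res false).2 then none else some (pvALoop l res false).1)
      = (pvRawSpan l).map (fun sp => res ++ pvDecode sp) := by
  intro n
  induction n with
  | zero =>
    intro l res hl
    have : l = [] := List.eq_nil_of_length_eq_zero (Nat.le_zero.mp hl)
    subst this
    rw [pvALoop_nil]
    simp [pvRawSpan, pvDecode]
  | succ n ih =>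
    intro l res hl
    match l with
    | [] =>
      rw [pvALoop_nil]
      simp [pvRawSpan, pvDecode]
    | c :: rest =>
      by_cases hc : c = '\\'
      · subst hc
        rw [pvALoop_cons_false, if_pos rfl, pvRawSpan_backslash]
        match rest with
        | [] => simp [pvALoop_nil]
        | d :: rest' =>
          have hlen : rest'.length ≤ n := by
            simp only [List.length_cons] at hl; omega
          rw [pvALoop_cons_true, ih rest' (res ++ [pvEsc d]) hlen]
          cases hsp : pvRawSpan rest' <;> simp [hsp, pvDecode_pair]
      · by_cases hq : c = '"'
        · subst hq
          rw [pvALoop_cons_false, if_neg hc, if_pos rfl, pvRawSpan_quote]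
          simp [pvDecode]
        · have hlen : rest.length ≤ n := by
            simp only [List.length_cons] at hl; omega
          rw [pvALoop_cons_false, if_neg hc, if_neg hq,
            ih rest (res ++ [c]) hlen, pvRawSpan_other c rest hc hq]
          cases hsp : pvRawSpan rest <;> simp [pvDecode_other c _ hc]

theorem extract_string_spec : Claim_equal_extract_string := by
  intro line _
  unfold Spec_extract_string extract_string extract_string_alt
  by_cases h : PySem.Str.find line "\"" = -1
  · simp only [if_pos h]
  · have hnn : (0:Int) ≤ PySem.Str.find line "\"" := by
      have h1 : (-1:Int) ≤ PySem.Str.find line "\"" :=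
        PySem.Chars.neg_one_le_find line.toList "\"".toList
      omega
    have hslice : PySem.List.slice line.toList (some (PySem.Str.find line "\"" + 1)) none
        = line.toList.drop ((PySem.Str.find line "\"").toNat + 1) := by
      rw [PySem.List.slice_from (ha := by omega)]
      congr 1
      omega
    have hk := pvKey (line.toList.drop ((PySem.Str.find line "\"").toNat + 1)).length
      (line.toList.drop ((PySem.Str.find line "\"").toNat + 1)) [] le_rfl
    simp only [List.nil_append] at hk
    simp only [if_neg h, hslice]
    cases hsp : pvRawSpan (line.toList.drop ((PySem.Str.find line "\"").toNat + 1)) with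
    | none =>
      rw [hsp] at hk
      by_cases he : (pvALoop (line.toList.drop ((PySem.Str.find line "\"").toNat + 1)) [] false).2 = true
      · rw [if_pos he]
      · rw [if_neg he] at hk
        simp at hk
    | some sp =>
      rw [hsp] at hk
      simp only [Option.map_some] at hk
      by_cases he : (pvALoop (line.toList.drop ((PySem.Str.find line "\"").toNat + 1)) [] false).2 = true
      · rw [if_pos he] at hk
        simp at hk
      · rw [if_neg he] at hk
        rw [Option.some.injEq] at hk
        rw [if_neg he]
        exact congrArg (fun t => some (String.ofList t)) hk
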